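-- pv_equiv track=rewrite | github.com/Callejas2925/Basics_of_Digital_Filtering | filtering.py | circular_convolution
-- ===== SOURCE A (Python) =====
-- def circular_convolution(input_signal, impulse_response_coefficients, transient=True):
--     """
--
--     :param input_signal: Signal that will be flipped and shifted to perform convolution.
--     :param impulse_response_coefficients: Static Signal to perform convolution.
--     :param transient: Transient Response. Adds zeros to allow the circular buffer to flush properly.
--     :return: Convolution Result
--     """
--     cir_buffer = [0] * len(impulse_response_coefficients)
--     unfolded_buffer = [0] * len(impulse_response_coefficients)
--     mac_buffer = []
--
--     if transient:
--         input_signal = input_signal + [0] * len(cir_buffer)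
--
--     cir_index = 0
--     for i in range(len(input_signal)):
--         cir_buffer[cir_index] = input_signal[i]
--
--         buffer_len = int(len(cir_buffer))
--         for j in range(len(cir_buffer)):
--             if cir_index - j < 0:
--                 unfolded_buffer[j] = cir_buffer[buffer_len - 1] * impulse_response_coefficients[j]
--                 buffer_len -= 1
--             else:
--                 unfolded_buffer[j] = cir_buffer[cir_index - j] * impulse_response_coefficients[j]
--
--         mac_buffer.append(sum(unfolded_buffer))
--
--         if cir_index >= len(cir_buffer) - 1:
--             cir_index = 0
--         else:
--             cir_index += 1
--     return mac_buffer
-- ===== SOURCE B (Python) =====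
-- def circular_convolution(input_signal, impulse_response_coefficients, transient=True):
--     m = len(impulse_response_coefficients)
--     sig = input_signal + [0] * m if transient else input_signal
--     result = []
--     for i in range(len(sig)):
--         acc = 0
--         for j in range(m):
--             acc += (sig[i - j] if i - j >= 0 else 0) * impulse_response_coefficients[j]
--         result.append(acc)
--     return result
-- ===== Notes on version B (the rewrite author's own statement) =====
-- stated objective: simpler
-- what changed: B drops A's circular buffer, unfolded-buffer and rolling wraparound index entirely and computes each output sample by directly indexing the zero-padded signal (sig[i-j], 0 for negative indices), accumulating the M products in j order.
import Mathlib
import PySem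

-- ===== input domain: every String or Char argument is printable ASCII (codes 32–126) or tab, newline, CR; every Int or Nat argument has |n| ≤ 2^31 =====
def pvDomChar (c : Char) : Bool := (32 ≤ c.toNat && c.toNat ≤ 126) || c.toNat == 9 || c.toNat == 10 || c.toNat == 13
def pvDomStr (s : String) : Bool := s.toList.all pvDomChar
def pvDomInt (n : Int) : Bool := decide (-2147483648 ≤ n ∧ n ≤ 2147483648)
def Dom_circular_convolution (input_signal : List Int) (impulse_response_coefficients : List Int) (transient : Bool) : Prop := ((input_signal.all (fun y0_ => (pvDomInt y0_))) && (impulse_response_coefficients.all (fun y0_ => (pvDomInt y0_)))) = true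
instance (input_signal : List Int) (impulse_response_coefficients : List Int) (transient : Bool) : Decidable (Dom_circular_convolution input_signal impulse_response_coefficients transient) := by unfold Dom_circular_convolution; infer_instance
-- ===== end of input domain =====

-- B drops A's circular buffer and rolling wraparound index and computes each output sample by
-- direct zero-padded indexing into the signal (objective: simpler).

-- ===== PORT A =====
-- inner loop over j: state = (unfolded_buffer, buffer_len)
def pvInnerStepA (cir h : List Int) (idx : Nat) (s : List Int × Int) (j : Nat) : List Int × Int :=
  if (idx : Int) - (j : Int) < 0 then
    (s.1.set j (PySem.List.pyGetD cir (s.2 - 1) 0 * h.getD j 0), s.2 - 1)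
  else
    (s.1.set j (PySem.List.pyGetD cir ((idx : Int) - (j : Int)) 0 * h.getD j 0), s.2)

-- outer loop over i: state = (cir_buffer, unfolded_buffer, mac_buffer, cir_index);
-- cir_buffer[cir_index] = input_signal[i] is in range under Pre_ (List.set; sig.getD i 0 is sig[i], i < len)
def pvStepA (sig h : List Int) (s : List Int × List Int × List Int × Nat) (i : Nat) :
    List Int × List Int × List Int × Nat :=
  let cir := s.1.set s.2.2.2 (sig.getD i 0)
  let p := (List.range h.length).foldl (pvInnerStepA cir h s.2.2.2) (s.2.1, (h.length : Int))
  let mac := s.2.2.1 ++ [p.1.foldl (· + ·) 0]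
  let idx := if (h.length : Int) - 1 ≤ (s.2.2.2 : Int) then 0 else s.2.2.2 + 1
  (cir, p.1, mac, idx)

def circular_convolution (input_signal : List Int) (impulse_response_coefficients : List Int) (transient : Bool) : List Int :=
  let sig := if transient then input_signal ++ List.replicate impulse_response_coefficients.length (0 : Int) else input_signal
  ((List.range sig.length).foldl (pvStepA sig impulse_response_coefficients)
    (List.replicate impulse_response_coefficients.length 0,
     List.replicate impulse_response_coefficients.length 0, [], 0)).2.2.1

-- ===== PORT B =====
-- acc over j: (sig[i-j] if i-j>=0 else 0) * h[j]; indices are in range, getD is exact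
def pvConvB (sig h : List Int) (i : Nat) : Int :=
  (List.range h.length).foldl
    (fun acc j => acc + (if j ≤ i then sig.getD (i - j) 0 else 0) * h.getD j 0) 0

def circular_convolution_alt (input_signal : List Int) (impulse_response_coefficients : List Int) (transient : Bool) : List Int :=
  let sig := if transient then input_signal ++ List.replicate impulse_response_coefficients.length (0 : Int) else input_signal
  (List.range sig.length).foldl (fun res i => res ++ [pvConvB sig impulse_response_coefficients i]) []

-- ===== PRECONDITION & SPEC =====
-- Pre_ excludes exactly the inputs where A raises IndexError: empty coefficient list with a
-- nonempty signal (cir_buffer is empty but is indexed).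
def Pre_circular_convolution (input_signal : List Int) (impulse_response_coefficients : List Int) (transient : Bool) : Prop :=
  impulse_response_coefficients ≠ [] ∨ input_signal = []
instance (input_signal : List Int) (impulse_response_coefficients : List Int) (transient : Bool) : Decidable (Pre_circular_convolution input_signal impulse_response_coefficients transient) := by unfold Pre_circular_convolution; infer_instance
def pvWitness_circular_convolution : List Int × List Int × Bool := ([1, 2, 3], [2, -1], true)

def Spec_circular_convolution (input_signal : List Int) (impulse_response_coefficients : List Int) (transient : Bool) (out : List Int) : Prop := out = circular_convolution_alt input_signal impulse_response_coefficients transient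
instance (input_signal : List Int) (impulse_response_coefficients : List Int) (transient : Bool) (out : List Int) : Decidable (Spec_circular_convolution input_signal impulse_response_coefficients transient out) := by unfold Spec_circular_convolution; infer_instance

-- ===== CLAIM (what is proved, stated in full; the proofs are below) =====
def Claim_equal_circular_convolution : Prop := ∀ (input_signal : List Int) (impulse_response_coefficients : List Int) (transient : Bool), Dom_circular_convolution input_signal impulse_response_coefficients transient → Pre_circular_convolution input_signal impulse_response_coefficients transient → Spec_circular_convolution input_signal impulse_response_coefficients transient (circular_convolution input_signal impulse_response_coefficients transient)

-- ===== LEMMAS AND PROOFS =====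

def zget (sig : List Int) (t : Int) : Int := if 0 ≤ t then sig.getD t.toNat 0 else 0

theorem getD_set' (l : List Int) (j t : Nat) (v : Int) (hj : j < l.length) :
    (l.set j v).getD t 0 = if t = j then v else l.getD t 0 := by
  rw [List.getD_eq_getElem?_getD, List.getElem?_set, List.getD_eq_getElem?_getD]
  by_cases h : j = t
  · subst h; rw [if_pos rfl, if_pos hj, if_pos rfl]; rfl
  · rw [if_neg h, if_neg (fun hh => h hh.symm)]

theorem emod_key (i k j M : Nat) (hjM : j < M) (q : Int)
    (hik : (i:Int) - k = j + M * q) : ((i:Int) - (k:Int)) % (M:Int) = j := by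
  rw [hik, Int.add_mul_emod_self_left]
  exact Int.emod_eq_of_lt (by positivity) (by exact_mod_cast hjM)

theorem eq_mod_of_dvd (i k M : Nat) (h : (M:Int) ∣ (i:Int) - k) (hk : k < M) : k = i % M := by
  have h1 : (i:Int) % M = (k:Int) % M := Int.emod_eq_emod_iff_emod_sub_eq_zero.mpr (Int.emod_eq_zero_of_dvd h)
  have h2 : ((i % M : Nat) : Int) = ((k % M : Nat) : Int) := by push_cast; exact h1
  have h3 : k % M = k := Nat.mod_eq_of_lt hk
  omega

theorem cast_div_mod (i M : Nat) : (i:Int) = (M:Int) * ((i / M : Nat) : Int) + ((i % M : Nat) : Int) := by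
  exact_mod_cast congrArg (Nat.cast : Nat → Int) (Nat.div_add_mod i M).symm

-- the circular buffer, right after writing sig[i] into slot i % M, read at slot k
theorem inner_spec (sig cir h unf : List Int) (i idx : Nat)
    (hM : 0 < h.length)
    (hul : unf.length = h.length)
    (hidx : idx = i % h.length)
    (hcir : ∀ k, k < h.length → cir.getD k 0 = zget sig ((i:Int) - (((i:Int) - (k:Int)) % (h.length:Int)))) :
    ∀ j, j ≤ h.length →
      ((List.range j).foldl (pvInnerStepA cir h idx) (unf, (h.length:Int))).1.length = h.length ∧
      ((List.range j).foldl (pvInnerStepA cir h idx) (unf, (h.length:Int))).2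
          = ((h.length - (j - idx - 1) : Nat) : Int) ∧
      ∀ t, t < h.length →
        ((List.range j).foldl (pvInnerStepA cir h idx) (unf, (h.length:Int))).1.getD t 0 =
          if t < j then zget sig ((i:Int) - (t:Int)) * h.getD t 0 else unf.getD t 0 := by
  have hidxM : idx < h.length := hidx ▸ Nat.mod_lt _ hM
  intro j
  induction j with
  | zero => intro _; refine ⟨hul, by simp, ?_⟩; intro t _; simp
  | succ j ih =>
    intro hj1
    obtain ⟨ihl, ihb, ihv⟩ := ih (by omega)
    rw [List.range_succ, List.foldl_append, List.foldl_cons, List.foldl_nil]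
    set p := (List.range j).foldl (pvInnerStepA cir h idx) (unf, (h.length:Int)) with hp
    have hjM : j < h.length := by omega
    -- the value read in either branch is zget sig (i - j)
    by_cases hbr : (idx : Int) - (j : Int) < 0
    · -- wraparound read at buffer_len - 1
      have hij : idx < j := by omega
      unfold pvInnerStepA
      rw [if_pos hbr]
      have hread : p.2 - 1 = ((h.length - (j - idx) : Nat) : Int) := by rw [ihb]; omega
      have hk : h.length - (j - idx) < h.length := by omega
      have hval : PySem.List.pyGetD cir (p.2 - 1) 0 = zget sig ((i:Int) - (j:Int)) := by
        rw [hread, PySem.List.pyGetD_natCast, hcir _ hk]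
        have hmod : ((i:Int) - ((h.length - (j - idx) : Nat) : Int)) % (h.length:Int) = (j:Int) := by
          refine emod_key i _ j h.length hjM (((i / h.length : Nat) : Int) - 1) ?_
          have hdm := cast_div_mod i h.length
          have hcast : ((h.length - (j - idx) : Nat) : Int) = (h.length:Int) - (j:Int) + (idx:Int) := by omega
          have hidx' : ((i % h.length : Nat) : Int) = (idx : Int) := by omega
          rw [hcast]; rw [hidx'] at hdm; ring_nf; ring_nf at hdm; linarith
        rw [hmod]
      rw [hval]
      refine ⟨by simpa using ihl, by simp only []; rw [hread]; push_cast; omega, ?_⟩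
      intro t ht
      rw [getD_set' _ _ _ _ (by omega)]
      by_cases htj : t = j
      · subst htj; rw [if_pos rfl, if_pos (by omega)]
      · rw [if_neg htj, ihv t ht]
        by_cases h2 : t < j
        · rw [if_pos h2, if_pos (by omega)]
        · rw [if_neg h2, if_neg (by omega)]
    · -- direct read at cir_index - j
      have hij : j ≤ idx := by omega
      unfold pvInnerStepA
      rw [if_neg hbr]
      have hread : (idx : Int) - (j : Int) = ((idx - j : Nat) : Int) := by omega
      have hk : idx - j < h.length := by omega
      have hval : PySem.List.pyGetD cir ((idx:Int) - (j:Int)) 0 = zget sig ((i:Int) - (j:Int)) := by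
        rw [hread, PySem.List.pyGetD_natCast, hcir _ hk]
        have hmod : ((i:Int) - ((idx - j : Nat) : Int)) % (h.length:Int) = (j:Int) := by
          refine emod_key i _ j h.length hjM ((i / h.length : Nat) : Int) ?_
          have hdm := cast_div_mod i h.length
          have hcast : ((idx - j : Nat) : Int) = (idx:Int) - (j:Int) := by omega
          have hidx' : ((i % h.length : Nat) : Int) = (idx : Int) := by omega
          rw [hcast]; rw [hidx'] at hdm; linarith
        rw [hmod]
      rw [hval]
      refine ⟨by simpa using ihl, by simp only []; rw [ihb]; omega, ?_⟩
      intro t ht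
      rw [getD_set' _ _ _ _ (by omega)]
      by_cases htj : t = j
      · subst htj; rw [if_pos rfl, if_pos (by omega)]
      · rw [if_neg htj, ihv t ht]
        by_cases h2 : t < j
        · rw [if_pos h2, if_pos (by omega)]
        · rw [if_neg h2, if_neg (by omega)]

theorem foldl_sum_eq (u : List Int) (M : Nat) (g : Nat → Int) (hl : u.length = M)
    (hg : ∀ t, t < M → u.getD t 0 = g t) :
    u.foldl (· + ·) 0 = (List.range M).foldl (fun a t => a + g t) 0 := by
  have hu : u = (List.range M).map g := by
    apply List.ext_getElem (by simp [hl])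
    intro n h1 h2
    have := hg n (by omega)
    rw [List.getD_eq_getElem _ _ h1] at this
    simp only [List.getElem_map, List.getElem_range]
    exact this
  rw [hu, List.foldl_map]

theorem convB_eq (sig h : List Int) (i : Nat) :
    pvConvB sig h i = (List.range h.length).foldl
      (fun a (t : Nat) => a + zget sig ((i:Int) - (t:Int)) * h.getD t 0) 0 := by
  unfold pvConvB
  congr 1
  funext a j
  congr 1
  unfold zget
  by_cases hj : j ≤ i
  · rw [if_pos hj, if_pos (by omega), Int.toNat_sub]
  · rw [if_neg hj, if_neg (by omega)]

theorem step_spec (sig h : List Int) (hM : 0 < h.length) (i : Nat)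
    (cir unf mac : List Int) (idx : Nat)
    (hcl : cir.length = h.length) (hul : unf.length = h.length)
    (hidx : idx = i % h.length)
    (hcir : ∀ k, k < h.length → cir.getD k 0
      = zget sig ((i:Int) - 1 - (((i:Int) - 1 - (k:Int)) % (h.length:Int)))) :
    (pvStepA sig h (cir, unf, mac, idx) i).1.length = h.length ∧
    (pvStepA sig h (cir, unf, mac, idx) i).2.1.length = h.length ∧
    (pvStepA sig h (cir, unf, mac, idx) i).2.2.1 = mac ++ [pvConvB sig h i] ∧
    (pvStepA sig h (cir, unf, mac, idx) i).2.2.2 = (i + 1) % h.length ∧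
    ∀ k, k < h.length → (pvStepA sig h (cir, unf, mac, idx) i).1.getD k 0
      = zget sig ((((i+1 : Nat)):Int) - 1 - (((((i+1 : Nat)):Int) - 1 - (k:Int)) % (h.length:Int))) := by
  have hidxM : idx < h.length := hidx ▸ Nat.mod_lt _ hM
  have hdm := cast_div_mod i h.length
  have hidx' : ((i % h.length : Nat) : Int) = (idx : Int) := by omega
  have hMne : (h.length:Int) ≠ 0 := by omega
  have hMpos : (0:Int) < (h.length:Int) := by omega
  -- characterisation of the buffer after writing sig[i] into slot idx
  have hcir' : ∀ k, k < h.length → (cir.set idx (sig.getD i 0)).getD k 0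
      = zget sig ((i:Int) - (((i:Int) - (k:Int)) % (h.length:Int))) := by
    intro k hk
    rw [getD_set' _ _ _ _ (by omega)]
    by_cases hki : k = idx
    · subst hki
      rw [if_pos rfl]
      have hmod : ((i:Int) - (k:Int)) % (h.length:Int) = ((0:Nat):Int) := by
        refine emod_key i k 0 h.length hM ((i / h.length : Nat) : Int) ?_
        rw [hidx'] at hdm
        rw [Nat.cast_zero, zero_add]
        linarith
      rw [hmod]
      unfold zget
      rw [if_pos (by omega)]
      norm_num
    · rw [if_neg hki, hcir k hk]
      have hndvd : ¬ (h.length:Int) ∣ (i:Int) - k := by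
        intro hdvd
        exact hki (by rw [eq_mod_of_dvd i k h.length hdvd hk]; omega)
      have hr0 : 0 ≤ ((i:Int) - 1 - k) % (h.length:Int) := Int.emod_nonneg _ hMne
      have hrM : ((i:Int) - 1 - k) % (h.length:Int) < (h.length:Int) := Int.emod_lt_of_pos _ hMpos
      have hde := Int.mul_ediv_add_emod ((i:Int) - 1 - k) (h.length:Int)
      rcases (Int.lt_iff_add_one_le.mp hrM).lt_or_eq with hlt | heq
      · have hstep : ((i:Int) - k) % (h.length:Int) = ((i:Int) - 1 - k) % (h.length:Int) + 1 := by
          have hik : (i:Int) - k = (((i:Int) - 1 - k) % (h.length:Int) + 1)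
              + (h.length:Int) * (((i:Int) - 1 - k) / (h.length:Int)) := by linarith
          rw [hik, Int.add_mul_emod_self_left]
          exact Int.emod_eq_of_lt (by omega) hlt
        exact congrArg (zget sig) (by omega)
      · exfalso
        apply hndvd
        exact ⟨((i:Int) - 1 - k) / (h.length:Int) + 1, by rw [mul_add]; linarith⟩
  obtain ⟨hil, hib, hiv⟩ := inner_spec sig (cir.set idx (sig.getD i 0)) h unf i idx hM hul hidx hcir'
      h.length (le_refl _)
  have hnm := Nat.div_add_mod i h.length
  unfold pvStepA
  simp only []
  refine ⟨by simpa using hcl, hil, ?_, ?_, ?_⟩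
  · have hs : (List.foldl (pvInnerStepA (cir.set idx (sig.getD i 0)) h idx) (unf, (h.length:Int))
        (List.range h.length)).1.foldl (· + ·) 0 = pvConvB sig h i :=
      (foldl_sum_eq _ h.length (fun t => zget sig ((i:Int) - (t:Int)) * h.getD t 0) hil
        (fun t ht => by rw [hiv t ht, if_pos ht])).trans (convB_eq sig h i).symm
    rw [hs]
  · by_cases hc : (h.length:Int) - 1 ≤ (idx:Int)
    · rw [if_pos hc]
      have h1 : i + 1 = h.length * (i / h.length) + h.length := by omega
      rw [h1, show h.length * (i / h.length) + h.length = h.length * (i / h.length + 1) from by ring,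
        Nat.mul_mod_right]
    · rw [if_neg hc]
      have h1 : i + 1 = (idx + 1) + h.length * (i / h.length) := by omega
      rw [h1, Nat.add_mul_mod_self_left, Nat.mod_eq_of_lt (by omega)]
  · intro k hk
    rw [hcir' k hk]
    exact congrArg (zget sig) (by push_cast; ring_nf)

theorem loop_spec (sig h : List Int) (hM : 0 < h.length) (i : Nat) :
    ((List.range i).foldl (pvStepA sig h)
      (List.replicate h.length 0, List.replicate h.length 0, [], 0)).1.length = h.length ∧
    ((List.range i).foldl (pvStepA sig h)
      (List.replicate h.length 0, List.replicate h.length 0, [], 0)).2.1.length = h.length ∧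
    ((List.range i).foldl (pvStepA sig h)
      (List.replicate h.length 0, List.replicate h.length 0, [], 0)).2.2.1
        = (List.range i).map (pvConvB sig h) ∧
    ((List.range i).foldl (pvStepA sig h)
      (List.replicate h.length 0, List.replicate h.length 0, [], 0)).2.2.2 = i % h.length ∧
    ∀ k, k < h.length → ((List.range i).foldl (pvStepA sig h)
      (List.replicate h.length 0, List.replicate h.length 0, [], 0)).1.getD k 0
        = zget sig ((i:Int) - 1 - (((i:Int) - 1 - (k:Int)) % (h.length:Int))) := by
  induction i with
  | zero =>
    refine ⟨by simp, by simp, by simp, by simp, ?_⟩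
    intro k hk
    have hnn : 0 ≤ (((0:Nat):Int) - 1 - (k:Int)) % (h.length:Int) := Int.emod_nonneg _ (by omega)
    rw [show (List.foldl (pvStepA sig h) (List.replicate h.length 0, List.replicate h.length 0, [], 0)
      (List.range 0)).1 = List.replicate h.length 0 from rfl, List.getD_replicate _ (by omega)]
    unfold zget
    rw [if_neg (by omega)]
  | succ i ih =>
    obtain ⟨hc, hu, hm, hx, hb⟩ := ih
    rw [List.range_succ, List.foldl_append, List.foldl_cons, List.foldl_nil]
    set s := (List.range i).foldl (pvStepA sig h)
      (List.replicate h.length 0, List.replicate h.length 0, [], 0) with hs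
    have hse : (s.1, s.2.1, s.2.2.1, s.2.2.2) = s := rfl
    obtain ⟨h1, h2, h3, h4, h5⟩ := step_spec sig h hM i s.1 s.2.1 s.2.2.1 s.2.2.2 hc hu hx hb
    rw [hse] at h1 h2 h3 h4 h5
    refine ⟨h1, h2, ?_, h4, h5⟩
    rw [h3, hm]
    simp

theorem alt_eq_map (sig h : List Int) :
    (List.range sig.length).foldl (fun res i => res ++ [pvConvB sig h i]) []
      = (List.range sig.length).map (pvConvB sig h) := by
  simpa using PySem.List.foldl_append_singleton_eq_map (pvConvB sig h) (List.range sig.length) []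

theorem cc_spec : ∀ (x h : List Int) (t : Bool), Pre_circular_convolution x h t →
    circular_convolution x h t = circular_convolution_alt x h t := by
  intro x h t hpre
  unfold circular_convolution circular_convolution_alt
  by_cases hh : h = []
  · subst hh
    rcases hpre with hne | hxe
    · exact absurd rfl hne
    · subst hxe; cases t <;> simp
  · have hM : 0 < h.length := List.length_pos_of_ne_nil hh
    simp only []
    rw [(loop_spec (if t then x ++ List.replicate h.length 0 else x) h hM _).2.2.1,
      alt_eq_map]

-- ===== VERDICT (by name: the statement is the Claim_ definition above) =====
theorem circular_convolution_spec : Claim_equal_circular_convolution := by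
  intro x h t _ hpre
  unfold Spec_circular_convolution
  exact cc_spec x h t hpre
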